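-- pv_equiv track=rewrite | github.com/dhyey-69/LeetCode | 1488.py | xyz
-- ===== SOURCE A (Python) =====
-- def xyz(rains):
--     def heappush(heap, item):
--         heap.append(item)
--         i = len(heap) - 1
--         while i > 0:
--             parent = (i - 1) // 2
--             if heap[parent][0] <= heap[i][0]:
--                 break
--             heap[parent], heap[i] = heap[i], heap[parent]
--             i = parent
--
--     def heappop(heap):
--         if not heap:
--             return None
--         smallest = heap[0]
--         last = heap.pop()
--         if heap:
--             heap[0] = last
--             i = 0
--             n = len(heap)
--             while True:
--                 left, right = 2 * i + 1, 2 * i + 2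
--                 smallest_i = i
--                 if left < n and heap[left][0] < heap[smallest_i][0]:
--                     smallest_i = left
--                 if right < n and heap[right][0] < heap[smallest_i][0]:
--                     smallest_i = right
--                 if smallest_i == i:
--                     break
--                 heap[i], heap[smallest_i] = heap[smallest_i], heap[i]
--                 i = smallest_i
--         return smallest
--
--     n = len(rains)
--     ans = [-1] * n
--
--     next_rains = {}
--     for i in range(n - 1, -1, -1):
--         lake = rains[i]
--         if lake > 0:
--             if lake not in next_rains:
--                 next_rains[lake] = []
--             next_rains[lake].append(i)
--
--     full = set()
--     heap = []
--
--     for i in range(n):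
--         lake = rains[i]
--         if lake > 0:
--             next_rains[lake].pop()
--             if lake in full:
--                 return []
--             full.add(lake)
--             if next_rains[lake]:
--                 next_idx = next_rains[lake][-1]
--                 heappush(heap, (next_idx, lake))
--             ans[i] = -1
--         else:
--             if heap:
--                 _, dry_lake = heappop(heap)
--                 full.remove(dry_lake)
--                 ans[i] = dry_lake
--             else:
--                 ans[i] = 1
--
--     return ans
-- ===== SOURCE B (Python) =====
-- def xyz(rains):
--     n = len(rains)
--
--     # next_rains[lake] = indices of lake's rain days, in decreasing order
--     next_rains = {}
--     for i in range(n - 1, -1, -1):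
--         lake = rains[i]
--         if lake > 0:
--             if lake not in next_rains:
--                 next_rains[lake] = []
--             next_rains[lake].append(i)
--
--     full = set()
--     pending = []  # unsorted list of (next_rain_index, lake) for full lakes with a future rain
--     ans = []
--
--     for i, lake in enumerate(rains):
--         if lake > 0:
--             next_rains[lake].pop()
--             if lake in full:
--                 return []
--             full.add(lake)
--             if next_rains[lake]:
--                 pending.append((next_rains[lake][-1], lake))
--             ans.append(-1)
--         else:
--             if pending:
--                 best = pending[0]
--                 for t in pending[1:]:
--                     if t[0] < best[0]:
--                         best = t
--                 pending.remove(best)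
--                 full.remove(best[1])
--                 ans.append(best[1])
--             else:
--                 ans.append(1)
--
--     return ans
-- ===== Notes on version B (the rewrite author's own statement) =====
-- stated objective: simpler
-- what changed: Replaces A's hand-written binary min-heap (sift-up/sift-down over an array) with a plain unsorted pending list that is linearly scanned for the minimal next-rain index on each dry day (exact because next-rain indices are distinct), and builds ans by appending instead of preallocate-and-set.
import Mathlib
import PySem

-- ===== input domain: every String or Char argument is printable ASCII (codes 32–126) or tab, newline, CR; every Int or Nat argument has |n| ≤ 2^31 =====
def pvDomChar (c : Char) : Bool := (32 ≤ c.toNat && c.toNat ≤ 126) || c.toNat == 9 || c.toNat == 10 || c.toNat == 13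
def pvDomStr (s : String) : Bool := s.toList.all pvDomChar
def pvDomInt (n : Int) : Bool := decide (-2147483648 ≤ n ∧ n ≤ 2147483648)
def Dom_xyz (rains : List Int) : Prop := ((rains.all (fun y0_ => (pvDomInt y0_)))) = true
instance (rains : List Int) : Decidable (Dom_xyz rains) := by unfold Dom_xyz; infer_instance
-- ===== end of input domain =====

-- B replaces A's hand-written binary heap by an unsorted pending list with a linear
-- min-scan on dry days (simpler: the sift-up/sift-down machinery disappears);
-- B also builds ans by appending instead of preallocate-and-set. Same return value everywhere.

-- ===== PORT A =====

-- heap cell read: indices are always in range where the Python reads them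
def hget (h : List (Int × Int)) (i : Nat) : Int × Int := h.getD i (0, 0)

def siftUp (h : List (Int × Int)) (i : Nat) : List (Int × Int) :=
  if hi : 0 < i then
    if (hget h ((i - 1) / 2)).1 ≤ (hget h i).1 then h
    else siftUp ((h.set ((i - 1) / 2) (hget h i)).set i (hget h ((i - 1) / 2))) ((i - 1) / 2)
  else h
termination_by i
decreasing_by omega

def heappush (h : List (Int × Int)) (item : Int × Int) : List (Int × Int) :=
  siftUp (h ++ [item]) h.length

-- smallest_i after the two child comparisons (the body of Python's sift-down step)
def pickS (h : List (Int × Int)) (i : Nat) : Nat :=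
  if 2 * i + 2 < h.length ∧ (hget h (2 * i + 2)).1 <
      (hget h (if 2 * i + 1 < h.length ∧ (hget h (2 * i + 1)).1 < (hget h i).1
               then 2 * i + 1 else i)).1
  then 2 * i + 2
  else if 2 * i + 1 < h.length ∧ (hget h (2 * i + 1)).1 < (hget h i).1
       then 2 * i + 1 else i

-- needed by siftDown's termination argument
lemma pickS_spec (h : List (Int × Int)) (i : Nat) :
    pickS h i = i ∨ (i < pickS h i ∧ pickS h i < h.length) := by
  unfold pickS
  split_ifs with h1 h2 <;>
    first
      | exact Or.inl rfl
      | exact Or.inr ⟨by omega, by omega⟩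

def siftDown (h : List (Int × Int)) (i : Nat) : List (Int × Int) :=
  if hs : pickS h i = i then h
  else siftDown ((h.set i (hget h (pickS h i))).set (pickS h i) (hget h i)) (pickS h i)
termination_by h.length - i
decreasing_by
  simp only [List.length_set]
  rcases pickS_spec h i with he | ⟨hl, hr⟩
  · exact absurd he hs
  · omega

-- Python's heappop returns None on an empty heap (A only calls it guarded)
def heappop (h : List (Int × Int)) : Option ((Int × Int) × List (Int × Int)) :=
  if h.isEmpty then none
  else if h.dropLast.isEmpty then some (hget h 0, h.dropLast)
  else some (hget h 0, siftDown (h.dropLast.set 0 (h.getLastD (0, 0))) 0)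

def loopA (rains : List Int) (idxs : List Nat) (ans : List Int)
    (nr : PySem.Dict Int (List Int)) (full : PySem.Set Int)
    (heap : List (Int × Int)) : List Int :=
  match idxs with
  | [] => ans
  | i :: rest =>
    let lake := rains.getD i 0
    if lake > 0 then
      -- next_rains[lake].pop(): the bucket is nonempty here in Python (it contains i)
      let b := (nr.getD lake []).dropLast
      let nr := nr.insert lake b
      if PySem.Set.contains full lake then []
      else
        let full := PySem.Set.add full lake
        let heap := if b ≠ [] then heappush heap (b.getLastD 0, lake) else heap
        loopA rains rest (ans.set i (-1)) nr full heap
    else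
      if heap ≠ [] then
        -- guarded: heap nonempty, heappop never returns none here
        let md := (heappop heap).getD ((0, 0), [])
        -- full.remove(dry): dry is a member here in Python, KeyError unreachable
        loopA rains rest (ans.set i md.1.2) nr
          ((PySem.Set.remove? full md.1.2).getD full) md.2
      else loopA rains rest (ans.set i 1) nr full heap

def xyz (rains : List Int) : List Int :=
  let n := rains.length
  let ans := List.replicate n (-1 : Int)
  let nr : PySem.Dict Int (List Int) :=
    (List.range n).reverse.foldl (fun d i =>
      let lake := rains.getD i 0
      if lake > 0 then
        let d := if d.contains lake then d else d.insert lake []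
        d.modify lake [] (fun l => l ++ [(i : Int)])
      else d) PySem.Dict.empty
  loopA rains (List.range n) ans nr [] []

-- ===== PORT B =====

-- first element of pending with minimal next-rain index (linear scan)
def scanMin (pending : List (Int × Int)) : Int × Int :=
  pending.tail.foldl (fun b t => if t.1 < b.1 then t else b) (pending.headD (0, 0))

def loopB (rains : List Int) (idxs : List Nat) (ans : List Int)
    (nr : PySem.Dict Int (List Int)) (full : PySem.Set Int)
    (pending : List (Int × Int)) : List Int :=
  match idxs with
  | [] => ans
  | i :: rest =>
    let lake := rains.getD i 0
    if lake > 0 then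
      let b := (nr.getD lake []).dropLast
      let nr := nr.insert lake b
      if PySem.Set.contains full lake then []
      else
        let full := PySem.Set.add full lake
        let pending := if b ≠ [] then pending ++ [(b.getLastD 0, lake)] else pending
        loopB rains rest (ans ++ [-1]) nr full pending
    else
      if pending ≠ [] then
        -- pending.remove(best): best is a member here, so List.erase is exact
        let best := scanMin pending
        loopB rains rest (ans ++ [best.2]) nr
          ((PySem.Set.remove? full best.2).getD full) (pending.erase best)
      else loopB rains rest (ans ++ [1]) nr full pending

def xyz_alt (rains : List Int) : List Int :=
  let n := rains.length
  let nr : PySem.Dict Int (List Int) :=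
    (List.range n).reverse.foldl (fun d i =>
      let lake := rains.getD i 0
      if lake > 0 then
        let d := if d.contains lake then d else d.insert lake []
        d.modify lake [] (fun l => l ++ [(i : Int)])
      else d) PySem.Dict.empty
  loopB rains (List.range n) [] nr [] []

-- ===== PRECONDITION & SPEC =====
def Spec_xyz (rains : List Int) (out : List Int) : Prop := out = xyz_alt rains
instance (rains : List Int) (out : List Int) : Decidable (Spec_xyz rains out) := by unfold Spec_xyz; infer_instance

-- ===== CLAIM (what is proved, stated in full; the proofs are below) =====
def Claim_equal_xyz : Prop := ∀ (rains : List Int), Dom_xyz rains → Spec_xyz rains (xyz rains)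

-- ===== LEMMAS AND PROOFS =====

-- the binary-heap shape invariant of A's array heap
def IsHeap (h : List (Int × Int)) : Prop :=
  ∀ j : Nat, 0 < j → j < h.length → (hget h ((j - 1) / 2)).1 ≤ (hget h j).1

lemma hget_eq_getElem (h : List (Int × Int)) (j : Nat) (hj : j < h.length) :
    hget h j = h[j] := by
  simp [hget, List.getD, List.getElem?_eq_getElem hj]

lemma hget_set_self (h : List (Int × Int)) (n : Nat) (hn : n < h.length) (a : Int × Int) :
    hget (h.set n a) n = a := by
  simp [hget, List.getD, hn]

lemma hget_set_ne (h : List (Int × Int)) {n m : Nat} (hnm : m ≠ n) (a : Int × Int) :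
    hget (h.set n a) m = hget h m := by
  simp [hget, List.getD, List.getElem?_set_ne (Ne.symm hnm)]

lemma hget_append_lt (h l : List (Int × Int)) {j : Nat} (hj : j < h.length) :
    hget (h ++ l) j = hget h j := by
  simp [hget, List.getD, List.getElem?_append_left hj]

lemma hget_dropLast (h : List (Int × Int)) {j : Nat} (hj : j < h.length - 1) :
    hget h.dropLast j = hget h j := by
  have h1 : j < h.dropLast.length := by simp; omega
  have h2 : j < h.length := by omega
  rw [hget_eq_getElem _ _ h1, hget_eq_getElem _ _ h2]
  simp [List.getElem_dropLast]

lemma cons_set_perm (t : List (Int × Int)) (j : Nat) (hj : j < t.length) (x : Int × Int) :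
    (t[j] :: t.set j x).Perm (x :: t) := by
  have hd : t.set j x = t.take j ++ x :: t.drop (j + 1) := List.set_eq_take_cons_drop x hj
  have ht : t = t.take j ++ t[j] :: t.drop (j + 1) := by
    have := List.set_eq_take_cons_drop (t[j]) hj
    rwa [List.set_getElem_self] at this
  rw [hd]; conv_rhs => rw [ht]
  refine List.Perm.trans (List.Perm.cons _ List.perm_middle) ?_
  refine List.Perm.trans (List.Perm.swap _ _ _) ?_
  exact List.Perm.cons _ List.perm_middle.symm

lemma set_set_perm : ∀ (h : List (Int × Int)) (p i : Nat), p < i → i < h.length →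
    ((h.set p (hget h i)).set i (hget h p)).Perm h := by
  intro h
  induction h with
  | nil => intro p i _ hi; simp at hi
  | cons x t IH =>
    intro p i hpi hi
    match p, i with
    | 0, j + 1 =>
      have hj : j < t.length := by simpa using hi
      have e1 : hget (x :: t) (j + 1) = t[j] := by
        rw [hget_eq_getElem _ _ hi]; simp
      have e0 : hget (x :: t) 0 = x := by rw [hget_eq_getElem _ _ (by simp)]; simp
      rw [e1, e0]
      simpa using cons_set_perm t j hj x
    | q + 1, j + 1 =>
      have hj : j < t.length := by simpa using hi
      have e1 : hget (x :: t) (j + 1) = hget t j := by simp [hget, List.getD]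
      have e0 : hget (x :: t) (q + 1) = hget t q := by simp [hget, List.getD]
      rw [e1, e0]
      simpa using (IH q j (by omega) hj)

lemma siftUp_perm : ∀ (i : Nat) (h : List (Int × Int)), i < h.length → (siftUp h i).Perm h := by
  intro i
  induction i using Nat.strong_induction_on with
  | _ i IH =>
    intro h hi
    unfold siftUp
    split
    · rename_i h0
      split
      · exact List.Perm.refl _
      · have hp : (i - 1) / 2 < i := by omega
        refine List.Perm.trans (IH _ hp _ (by simpa using lt_of_le_of_lt (Nat.le_of_lt hp) hi)) ?_
        exact set_set_perm h _ i (by omega) hi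
    · exact List.Perm.refl _

lemma siftUp_isHeap : ∀ (i : Nat) (h : List (Int × Int)), i < h.length →
    (∀ j : Nat, 0 < j → j < h.length → j ≠ i → (hget h ((j - 1) / 2)).1 ≤ (hget h j).1) →
    (0 < i → ∀ c : Nat, (c = 2 * i + 1 ∨ c = 2 * i + 2) → c < h.length →
      (hget h ((i - 1) / 2)).1 ≤ (hget h c).1) →
    IsHeap (siftUp h i) := by
  intro i
  induction i using Nat.strong_induction_on with
  | _ i IH =>
    intro h hi h1 h2
    unfold siftUp
    split
    · rename_i h0
      split
      · rename_i hle
        intro j hj hjl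
        by_cases hji : j = i
        · subst hji; exact hle
        · exact h1 j hj hjl hji
      · rename_i hnle
        have hlt : (hget h i).1 < (hget h ((i - 1) / 2)).1 := by omega
        have hpi : (i - 1) / 2 < i := by omega
        have hp : (i - 1) / 2 < h.length := by omega
        set p := (i - 1) / 2 with hpdef
        set h' := (h.set p (hget h i)).set i (hget h p) with hdef
        have elen : h'.length = h.length := by simp [hdef]
        have ei : hget h' i = hget h p := hget_set_self _ i (by simp; omega) _
        have ep : hget h' p = hget h i := by
          rw [hdef, hget_set_ne _ (by omega), hget_set_self _ p hp]
        have eo : ∀ m : Nat, m ≠ p → m ≠ i → hget h' m = hget h m := by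
          intro m hmp hmi
          rw [hdef, hget_set_ne _ hmi, hget_set_ne _ hmp]
        refine IH p hpi h' (by rw [elen]; omega) ?_ ?_
        · intro j hj hjl hjp
          rw [elen] at hjl
          by_cases hji : j = i
          · subst hji
            have : (j - 1) / 2 = p := hpdef.symm
            rw [this, ep, ei]
            exact hlt.le
          · rw [eo j hjp hji]
            by_cases hci : (j - 1) / 2 = i
            · rw [hci, ei]
              exact h2 h0 j (by omega) hjl
            · by_cases hcp : (j - 1) / 2 = p
              · rw [hcp, ep]
                have := h1 j hj hjl hji
                rw [hcp] at this
                exact hlt.le.trans this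
              · rw [eo _ hcp hci]
                exact h1 j hj hjl hji
        · intro hp0 c hc hcl
          rw [elen] at hcl
          have egp : hget h' ((p - 1) / 2) = hget h ((p - 1) / 2) :=
            eo _ (by omega) (by omega)
          rw [egp]
          have hpar : (hget h ((p - 1) / 2)).1 ≤ (hget h p).1 := h1 p hp0 hp (by omega)
          by_cases hci : c = i
          · subst hci; rw [ei]; exact hpar
          · have hcp : c ≠ p := by omega
            rw [eo c hcp hci]
            have hcc := h1 c (by omega) hcl hci
            have : (c - 1) / 2 = p := by omega
            rw [this] at hcc
            exact hpar.trans hcc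
    · rename_i h0
      intro j hj hjl
      exact h1 j hj hjl (by omega)

lemma heappush_spec (h : List (Int × Int)) (x : Int × Int) (hh : IsHeap h) :
    IsHeap (heappush h x) ∧ (heappush h x).Perm (h ++ [x]) := by
  have hlen : h.length < (h ++ [x]).length := by simp
  constructor
  · refine siftUp_isHeap h.length (h ++ [x]) hlen ?_ ?_
    · intro j hj hjl hne
      have hj2 : j < h.length := by simp at hjl; omega
      have hp2 : (j - 1) / 2 < h.length := by omega
      rw [hget_append_lt _ _ hj2, hget_append_lt _ _ hp2]
      exact hh j hj hj2
    · intro h0 c hc hcl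
      simp at hcl; omega
  · exact siftUp_perm h.length (h ++ [x]) hlen

lemma pickS_eq_min (h : List (Int × Int)) (i : Nat) (he : pickS h i = i) :
    ∀ c : Nat, (c = 2 * i + 1 ∨ c = 2 * i + 2) → c < h.length →
      (hget h i).1 ≤ (hget h c).1 := by
  unfold pickS at he
  split_ifs at he <;> intro c hc hcl <;> rcases hc with rfl | rfl <;> omega

lemma pickS_ne_min (h : List (Int × Int)) (i : Nat) (hne : pickS h i ≠ i) :
    (i < pickS h i ∧ pickS h i < h.length) ∧
    (pickS h i = 2 * i + 1 ∨ pickS h i = 2 * i + 2) ∧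
    (hget h (pickS h i)).1 < (hget h i).1 ∧
    (∀ c : Nat, (c = 2 * i + 1 ∨ c = 2 * i + 2) → c < h.length →
      (hget h (pickS h i)).1 ≤ (hget h c).1) := by
  unfold pickS at hne ⊢
  split_ifs at hne ⊢ <;>
    first
      | exact absurd rfl hne
      | exact ⟨⟨by omega, by omega⟩, Or.inl rfl, by omega,
          fun c hc hcl => by rcases hc with rfl | rfl <;> omega⟩
      | exact ⟨⟨by omega, by omega⟩, Or.inr rfl, by omega,
          fun c hc hcl => by rcases hc with rfl | rfl <;> omega⟩

lemma siftDown_perm_aux : ∀ (n : Nat) (h : List (Int × Int)) (i : Nat),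
    h.length - i ≤ n → (siftDown h i).Perm h := by
  intro n
  induction n with
  | zero =>
    intro h i hn
    unfold siftDown
    split
    · exact List.Perm.refl _
    · rename_i hs
      rcases pickS_ne_min h i hs with ⟨⟨hi1, hi2⟩, _, _, _⟩
      omega
  | succ n IH =>
    intro h i hn
    unfold siftDown
    split
    · exact List.Perm.refl _
    · rename_i hs
      rcases pickS_ne_min h i hs with ⟨⟨hi1, hi2⟩, _, _, _⟩
      refine List.Perm.trans (IH _ _ ?_) (set_set_perm h i (pickS h i) hi1 hi2)
      simp only [List.length_set]; omega

lemma siftDown_perm (h : List (Int × Int)) (i : Nat) : (siftDown h i).Perm h :=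
  siftDown_perm_aux h.length h i (by omega)

lemma siftDown_isHeap_aux : ∀ (n : Nat) (h : List (Int × Int)) (i : Nat),
    h.length - i ≤ n →
    (∀ j : Nat, 0 < j → j < h.length → (j - 1) / 2 ≠ i →
      (hget h ((j - 1) / 2)).1 ≤ (hget h j).1) →
    (0 < i → ∀ c : Nat, (c = 2 * i + 1 ∨ c = 2 * i + 2) → c < h.length →
      (hget h ((i - 1) / 2)).1 ≤ (hget h c).1) →
    IsHeap (siftDown h i) := by
  intro n
  induction n with
  | zero =>
    intro h i hn hA hB
    unfold siftDown
    split
    · rename_i he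
      intro j hj hjl
      by_cases hpj : (j - 1) / 2 = i
      · rw [hpj]
        exact pickS_eq_min h i he j (by omega) hjl
      · exact hA j hj hjl hpj
    · rename_i hs
      rcases pickS_ne_min h i hs with ⟨⟨hi1, hi2⟩, _, _, _⟩
      omega
  | succ n IH =>
    intro h i hn hA hB
    unfold siftDown
    split
    · rename_i he
      intro j hj hjl
      by_cases hpj : (j - 1) / 2 = i
      · rw [hpj]
        exact pickS_eq_min h i he j (by omega) hjl
      · exact hA j hj hjl hpj
    · rename_i hs
      rcases pickS_ne_min h i hs with ⟨⟨his, hsl⟩, hor, hlt, hmin⟩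
      set s := pickS h i with hsdef
      set h' := (h.set i (hget h s)).set s (hget h i) with hdef
      have elen : h'.length = h.length := by simp [hdef]
      have es : hget h' s = hget h i := hget_set_self _ s (by simp; omega) _
      have eiv : hget h' i = hget h s := by
        rw [hdef, hget_set_ne _ (by omega), hget_set_self _ i (by omega)]
      have eo : ∀ m : Nat, m ≠ i → m ≠ s → hget h' m = hget h m := by
        intro m hmi hms
        rw [hdef, hget_set_ne _ hms, hget_set_ne _ hmi]
      have hps : (s - 1) / 2 = i := by rcases hor with hh | hh <;> omega
      refine IH h' s (by rw [elen]; omega) ?_ ?_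
      · intro j hj hjl hne
        rw [elen] at hjl
        by_cases hjs : j = s
        · subst hjs
          rw [hps, eiv, es]
          exact hlt.le
        · by_cases hji : j = i
          · subst hji
            rw [eo ((j - 1) / 2) (by omega) (by omega), eiv]
            exact hB hj s hor hsl
          · by_cases hpj : (j - 1) / 2 = i
            · rw [hpj, eiv, eo j hji hjs]
              exact hmin j (by omega) hjl
            · have hpns : (j - 1) / 2 ≠ s := hne
              rw [eo j hji hjs, eo _ hpj hpns]
              exact hA j hj hjl hpj
      · intro _ c hc hcl
        rw [elen] at hcl
        rw [hps, eiv]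
        have hcs : c ≠ s := by omega
        have hci : c ≠ i := by omega
        rw [eo c hci hcs]
        have hcc := hA c (by omega) hcl (by omega)
        have : (c - 1) / 2 = s := by omega
        rw [this] at hcc
        exact hcc

lemma siftDown_isHeap (h : List (Int × Int)) (i : Nat)
    (hA : ∀ j : Nat, 0 < j → j < h.length → (j - 1) / 2 ≠ i →
      (hget h ((j - 1) / 2)).1 ≤ (hget h j).1)
    (hB : 0 < i → ∀ c : Nat, (c = 2 * i + 1 ∨ c = 2 * i + 2) → c < h.length →
      (hget h ((i - 1) / 2)).1 ≤ (hget h c).1) :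
    IsHeap (siftDown h i) :=
  siftDown_isHeap_aux h.length h i (by omega) hA hB

lemma root_min (h : List (Int × Int)) (hh : IsHeap h) :
    ∀ j : Nat, j < h.length → (hget h 0).1 ≤ (hget h j).1 := by
  intro j
  induction j using Nat.strong_induction_on with
  | _ j IH =>
    intro hj
    rcases Nat.eq_zero_or_pos j with rfl | h0
    · exact le_refl _
    · exact le_trans (IH ((j - 1) / 2) (by omega) (by omega)) (hh j h0 hj)

lemma root_min_mem (h : List (Int × Int)) (hh : IsHeap h) :
    ∀ x ∈ h, (hget h 0).1 ≤ x.1 := by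
  intro x hx
  obtain ⟨j, hj, hxe⟩ := List.mem_iff_getElem.mp hx
  rw [← hxe, ← hget_eq_getElem _ _ hj]
  exact root_min h hh j hj

lemma heappop_spec (h : List (Int × Int)) (hne : h ≠ []) (hh : IsHeap h) :
    ∃ h', heappop h = some (hget h 0, h') ∧ IsHeap h' ∧ (hget h 0 :: h').Perm h := by
  have hE : h.isEmpty = false := by simpa [List.isEmpty_iff] using hne
  unfold heappop
  rw [hE]
  simp only [Bool.false_eq_true, if_false]
  by_cases h1 : h.dropLast.isEmpty
  · refine ⟨h.dropLast, by rw [if_pos h1], ?_, ?_⟩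
    · intro j hj hjl
      rw [List.isEmpty_iff] at h1
      rw [h1] at hjl
      simp at hjl
    · rw [List.isEmpty_iff] at h1
      have hlen : h.length = 1 := by
        have h2 : h.dropLast.length = h.length - 1 := List.length_dropLast
        rw [h1] at h2
        simp at h2
        have := List.length_pos_of_ne_nil hne
        omega
      obtain ⟨a, rfl⟩ := List.length_eq_one_iff.mp hlen
      rw [h1]
      have : hget [a] 0 = a := by simp [hget]
      rw [this]
  · rw [if_neg h1]
    rw [List.isEmpty_iff] at h1
    have hdl : 0 < h.dropLast.length := List.length_pos_of_ne_nil h1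
    have hlen2 : 2 ≤ h.length := by
      have h2 : h.dropLast.length = h.length - 1 := List.length_dropLast
      omega
    set h2 := h.dropLast.set 0 (h.getLastD (0, 0)) with h2def
    refine ⟨siftDown h2 0, rfl, ?_, ?_⟩
    · refine siftDown_isHeap h2 0 ?_ (fun h0 => absurd h0 (lt_irrefl 0))
      intro j hj hjl hpne
      have hjl2 : j < h.length - 1 := by
        rw [h2def] at hjl; simp at hjl; omega
      have ej : hget h2 j = hget h j := by
        rw [h2def, hget_set_ne _ (by omega), hget_dropLast _ hjl2]
      have ep : hget h2 ((j - 1) / 2) = hget h ((j - 1) / 2) := by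
        rw [h2def, hget_set_ne _ hpne, hget_dropLast _ (by omega)]
      rw [ej, ep]
      exact hh j hj (by omega)
    · refine List.Perm.trans (List.Perm.cons _ (siftDown_perm h2 0)) ?_
      obtain ⟨u, hu⟩ : ∃ u, h.dropLast = hget h 0 :: u := by
        obtain ⟨a, u, hau⟩ := List.exists_cons_of_ne_nil h1
        have ha : a = hget h 0 := by
          have ed : h.dropLast[0]'hdl = h[0]'(by omega) := List.getElem_dropLast hdl
          have e0 : hget h 0 = h[0]'(by omega) := hget_eq_getElem _ _ (by omega)
          rw [e0, ← ed]
          simp [hau]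
        exact ⟨u, by rw [hau, ha]⟩
      have h2e : h2 = h.getLastD (0, 0) :: u := by rw [h2def, hu]; rfl
      have hgl : h.getLastD (0, 0) = h.getLast hne := by
        rw [List.getLastD_eq_getLast?, List.getLast?_eq_some_getLast hne]
        rfl
      rw [h2e, hgl]
      refine List.Perm.trans (List.Perm.cons _ ((List.perm_append_singleton _ u).symm)) ?_
      have hsplit : h.dropLast ++ [h.getLast hne] = h := List.dropLast_append_getLast hne
      have : hget h 0 :: (u ++ [h.getLast hne]) = (hget h 0 :: u) ++ [h.getLast hne] := rfl
      rw [this, ← hu, hsplit]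
lemma foldl_pick (l : List (Int × Int)) : ∀ b : Int × Int,
    (l.foldl (fun b t => if t.1 < b.1 then t else b) b = b ∨
      l.foldl (fun b t => if t.1 < b.1 then t else b) b ∈ l) ∧
    (l.foldl (fun b t => if t.1 < b.1 then t else b) b).1 ≤ b.1 ∧
    ∀ x ∈ l, (l.foldl (fun b t => if t.1 < b.1 then t else b) b).1 ≤ x.1 := by
  induction l with
  | nil => intro b; simp
  | cons y t IH =>
    intro b
    simp only [List.foldl_cons]
    obtain ⟨m1, m2, m3⟩ := IH (if y.1 < b.1 then y else b)
    have hb : (if y.1 < b.1 then y else b).1 ≤ b.1 := by split <;> omega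
    have hy : (if y.1 < b.1 then y else b).1 ≤ y.1 := by split <;> omega
    refine ⟨?_, m2.trans hb, ?_⟩
    · rcases m1 with m1 | m1
      · rw [m1]
        split
        · exact Or.inr (List.mem_cons_self)
        · exact Or.inl rfl
      · exact Or.inr (List.mem_cons_of_mem _ m1)
    · intro x hx
      rcases List.mem_cons.mp hx with rfl | hx
      · exact m2.trans hy
      · exact m3 x hx

lemma scanMin_spec (l : List (Int × Int)) (hne : l ≠ []) :
    scanMin l ∈ l ∧ ∀ x ∈ l, (scanMin l).1 ≤ x.1 := by
  obtain ⟨hd, tl, rfl⟩ := List.exists_cons_of_ne_nil hne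
  unfold scanMin
  simp only [List.tail_cons, List.headD_cons]
  obtain ⟨m1, m2, m3⟩ := foldl_pick tl hd
  constructor
  · rcases m1 with m1 | m1
    · rw [m1]; exact List.mem_cons_self
    · exact List.mem_cons_of_mem _ m1
  · intro x hx
    rcases List.mem_cons.mp hx with rfl | hx
    · exact m2
    · exact m3 x hx

lemma set_append_replicate (a : List Int) (m : Nat) (c v : Int) :
    (a ++ List.replicate (m + 1) c).set a.length v = a ++ v :: List.replicate m c := by
  rw [List.set_append_right _ _ (le_refl _)]
  simp [List.replicate_succ]

-- dict facts specific to the nr bucket updates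
lemma getD_of_not_contains {ν : Type} (d : PySem.Dict Int ν) (k : Int) (dflt : ν)
    (hc : d.contains k = false) : d.getD k dflt = dflt := by
  have hfind : d.items.find? (fun p => p.1 == k) = none := by
    rw [List.find?_eq_none]
    intro p hp
    simp only [PySem.Dict.contains, List.any_eq_false] at hc
    simpa using hc p hp
  simp [PySem.Dict.getD, PySem.Dict.get?, hfind]

-- bucket invariant of next_rains: every stored index points at a rain day of its lake
def NRI (rains : List Int) (nr : PySem.Dict Int (List Int)) : Prop :=
  ∀ lake : Int, ∀ j ∈ nr.getD lake [], rains.getD j.toNat 0 = lake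

lemma NRI_insert_sub (rains : List Int) (nr : PySem.Dict Int (List Int)) (lake : Int)
    (b : List Int) (hnri : NRI rains nr) (hsub : ∀ j ∈ b, j ∈ nr.getD lake []) :
    NRI rains (nr.insert lake b) := by
  intro lake' j hj
  by_cases hlk : lake' = lake
  · subst hlk
    rw [PySem.Dict.getD_insert_self] at hj
    exact hnri lake' j (hsub j hj)
  · rw [PySem.Dict.getD_insert_of_ne] at hj
    · exact hnri lake' j hj
    · exact hlk

lemma NRI_build_aux (rains : List Int) :
    ∀ (l : List Nat) (d : PySem.Dict Int (List Int)), NRI rains d →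
      NRI rains (l.foldl (fun d i =>
        let lake := rains.getD i 0
        if lake > 0 then
          let d := if d.contains lake then d else d.insert lake []
          d.modify lake [] (fun l => l ++ [(i : Int)])
        else d) d) := by
  intro l
  induction l with
  | nil => intro d hd; exact hd
  | cons i t IH =>
    intro d hd
    simp only [List.foldl_cons]
    apply IH
    by_cases hpos : rains.getD i 0 > 0
    · simp only [hpos, if_true]
      intro lk j hj
      by_cases hlk : lk = rains.getD i 0
      · rw [hlk] at hj ⊢
        rw [PySem.Dict.getD_modify_self] at hj
        have hbase : (if d.contains (rains.getD i 0) then d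
              else d.insert (rains.getD i 0) []).getD (rains.getD i 0) []
            = d.getD (rains.getD i 0) [] := by
          by_cases hc : d.contains (rains.getD i 0)
          · rw [if_pos hc]
          · rw [if_neg hc]
            rw [PySem.Dict.getD_insert_self]
            rw [getD_of_not_contains d _ [] (by simpa using hc)]
        rw [hbase] at hj
        rcases List.mem_append.mp hj with hj | hj
        · exact hd _ j hj
        · simp at hj
          subst hj
          simp
      · rw [PySem.Dict.getD_modify_of_ne] at hj
        · by_cases hc : d.contains (rains.getD i 0)
          · rw [if_pos hc] at hj
            exact hd _ j hj
          · rw [if_neg hc] at hj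
            rw [PySem.Dict.getD_insert_of_ne] at hj
            · exact hd _ j hj
            · exact hlk
        · exact hlk
    · simp only [hpos, if_false]
      exact hd

lemma loop_eq (rains : List Int) :
    ∀ (m k : Nat) (ansB : List Int) (nr : PySem.Dict Int (List Int))
      (full : PySem.Set Int) (heap pending : List (Int × Int)),
      ansB.length = k →
      heap.Perm pending →
      IsHeap heap →
      (∀ x ∈ heap, rains.getD x.1.toNat 0 = x.2) →
      NRI rains nr →
      loopA rains (List.range' k m) (ansB ++ List.replicate m (-1)) nr full heap
        = loopB rains (List.range' k m) ansB nr full pending := by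
  intro m
  induction m with
  | zero =>
    intro k ansB nr full heap pending hk hperm hheap hfn hnri
    simp [loopA, loopB]
  | succ m IH =>
    intro k ansB nr full heap pending hk hperm hheap hfn hnri
    rw [List.range'_succ]
    simp only [loopA, loopB]
    by_cases hpos : rains.getD k 0 > 0
    · simp only [hpos, if_true]
      by_cases hfl : PySem.Set.contains full (rains.getD k 0)
      · simp only [hfl, if_true]
      · simp only [hfl, Bool.false_eq_true, if_false]
        set lake := rains.getD k 0 with hlk
        set b := (nr.getD lake []).dropLast with hb
        have hans : (ansB ++ List.replicate (m + 1) (-1 : Int)).set k (-1)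
            = (ansB ++ [-1]) ++ List.replicate m (-1) := by
          rw [← hk, set_append_replicate]
          simp
        rw [hans]
        have hnri' : NRI rains (nr.insert lake b) := by
          refine NRI_insert_sub rains nr lake b hnri ?_
          intro j hj
          exact List.mem_of_mem_dropLast hj
        by_cases hbe : b ≠ []
        · rw [if_pos hbe, if_pos hbe]
          obtain ⟨hh', hp'⟩ := heappush_spec heap (b.getLastD 0, lake) hheap
          refine IH (k + 1) (ansB ++ [-1]) _ _ _ _ (by simp [hk]) ?_ hh' ?_ hnri'
          · exact hp'.trans (hperm.append_right _)
          · intro x hx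
            rcases List.mem_append.mp (hp'.mem_iff.mp hx) with hx | hx
            · exact hfn x hx
            · have hx1 := List.mem_singleton.mp hx
              subst hx1
              have hmem : b.getLastD 0 ∈ nr.getD lake [] := by
                refine List.mem_of_mem_dropLast ?_
                rw [← hb]
                have : b.getLastD 0 = b.getLast (by simpa using hbe) := by
                  rw [List.getLastD_eq_getLast?, List.getLast?_eq_some_getLast (by simpa using hbe)]
                  rfl
                rw [this]
                exact List.getLast_mem _
              exact hnri lake (b.getLastD 0) hmem
        · rw [if_neg hbe, if_neg hbe]
          exact IH (k + 1) (ansB ++ [-1]) _ _ _ _ (by simp [hk]) hperm hheap hfn hnri'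
    · simp only [hpos, if_false]
      by_cases hhe : heap ≠ []
      · have hpe : pending ≠ [] := by
          intro hp0
          rw [hp0] at hperm
          exact hhe (List.Perm.eq_nil hperm)
        rw [if_pos hhe, if_pos hpe]
        obtain ⟨h', hpop, hh', hperm'⟩ := heappop_spec heap hhe hheap
        rw [hpop]
        simp only [Option.getD_some]
        obtain ⟨hmem, hmin⟩ := scanMin_spec pending hpe
        have hm0mem : hget heap 0 ∈ heap := by
          rw [hget_eq_getElem _ _ (List.length_pos_of_ne_nil hhe)]
          exact List.getElem_mem _
        have hbest_heap : scanMin pending ∈ heap := hperm.mem_iff.mpr hmem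
        have hm0_pending : hget heap 0 ∈ pending := hperm.mem_iff.mp hm0mem
        have hkey : (hget heap 0).1 = (scanMin pending).1 := by
          have h1 := root_min_mem heap hheap (scanMin pending) hbest_heap
          have h2 := hmin (hget heap 0) hm0_pending
          omega
        have heqv : hget heap 0 = scanMin pending := by
          have e1 := hfn (hget heap 0) hm0mem
          have e2 := hfn (scanMin pending) hbest_heap
          have : (hget heap 0).2 = (scanMin pending).2 := by
            rw [← e1, ← e2, hkey]
          exact Prod.ext hkey this
        have hperm2 : h'.Perm (pending.erase (scanMin pending)) := by
          have hc : (scanMin pending :: h').Perm (scanMin pending :: pending.erase (scanMin pending)) := by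
            rw [← heqv]
            exact hperm'.trans (hperm.trans (List.perm_cons_erase (heqv ▸ hm0_pending)))
          exact hc.cons_inv
        have hans : (ansB ++ List.replicate (m + 1) (-1 : Int)).set k ((hget heap 0).2)
            = (ansB ++ [(scanMin pending).2]) ++ List.replicate m (-1) := by
          rw [← hk, set_append_replicate, heqv]
          simp
        rw [hans, heqv]
        refine IH (k + 1) (ansB ++ [(scanMin pending).2]) _ _ _ _ (by simp [hk]) hperm2 hh' ?_ hnri
        intro x hx
        have : x ∈ heap := hperm'.mem_iff.mp (List.mem_cons_of_mem _ hx)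
        exact hfn x this
      · rw [not_ne_iff] at hhe
        have hpe : pending = [] := by
          rw [hhe] at hperm
          exact (List.Perm.eq_nil hperm.symm)
        subst hhe
        subst hpe
        simp only [ne_eq, not_true_eq_false, if_false]
        have hans : (ansB ++ List.replicate (m + 1) (-1 : Int)).set k 1
            = (ansB ++ [1]) ++ List.replicate m (-1) := by
          rw [← hk, set_append_replicate]
          simp
        rw [hans]
        exact IH (k + 1) (ansB ++ [1]) _ _ _ _ (by simp [hk]) (List.Perm.refl [])
          (by intro j hj hl; simp at hl) (by intro x hx; simp at hx) hnri

-- ===== VERDICT (by name: the statement is the Claim_ definition above) =====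
theorem xyz_spec : Claim_equal_xyz := by
  intro rains _
  unfold Spec_xyz xyz xyz_alt
  have h := loop_eq rains rains.length 0 [] _ [] [] [] rfl (List.Perm.refl _)
    (by intro j hj hlen; simp at hlen) (by simp)
    (NRI_build_aux rains (List.range rains.length).reverse PySem.Dict.empty
      (by intro lake j hj; simp [PySem.Dict.getD, PySem.Dict.get?, PySem.Dict.empty] at hj))
  simpa [List.range_eq_range'] using h
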